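-- pv_equiv track=rewrite | github.com/dindrak/AdventOfCode2024 | day4/main.py | get_horiz_cnt
-- ===== SOURCE A (Python) =====
-- def get_horiz_cnt(in_matrix: list[list[str]], kwds_full_list: list):
--     kwds_cnt = 0
--
--     for word in kwds_full_list:
--         word_len = len(word)
--         # Standard matrix
--         for row_idx, row in enumerate(in_matrix):
--             row_idx_min = row_idx
--             row_idx_max = row_idx + word_len
--             matrix_height = len(in_matrix)
--             for col_idx, col in enumerate(row):
--                 col_idx_min = col_idx
--                 col_idx_max = col_idx + word_len
--                 matrix_width = len(row)
--
--                 # Match horizontally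
--                 if col_idx_max <= matrix_width:
--                     to_test = row[col_idx_min:col_idx_max]
--                     to_test = "".join(to_test)
--                     if word in to_test:
--                         kwds_cnt += 1
--
--     return kwds_cnt
-- ===== SOURCE B (Python) =====
-- def get_horiz_cnt(in_matrix: list[list[str]], kwds_full_list: list):
--     # Different algorithm: concatenate each row once and record the prefix
--     # character offset of every cell boundary; locate all occurrence
--     # positions of each word in the concatenated row in one scan; a column
--     # window matches iff some occurrence lies inside its offset interval.
--     total = 0
--     for row in in_matrix:
--         starts = [0]
--         for cell in row:
--             starts.append(starts[-1] + len(cell))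
--         full = "".join(row)
--         width = len(row)
--         for word in kwds_full_list:
--             wl = len(word)
--             occ = [p for p in range(len(full) + 1) if full[p:p + wl] == word]
--             for col in range(width):
--                 if col + wl <= width and any(
--                         starts[col] <= p and p + wl <= starts[col + wl]
--                         for p in occ):
--                     total += 1
--     return total
-- ===== Notes on version B (the rewrite author's own statement) =====
-- stated objective: alternative
-- what changed: B never builds the per-column window strings: it concatenates each row once, records prefix character offsets of the cell boundaries, computes all occurrence positions of each word in the concatenated row, and counts a column iff some occurrence falls inside that column's offset interval.
import Mathlib
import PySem

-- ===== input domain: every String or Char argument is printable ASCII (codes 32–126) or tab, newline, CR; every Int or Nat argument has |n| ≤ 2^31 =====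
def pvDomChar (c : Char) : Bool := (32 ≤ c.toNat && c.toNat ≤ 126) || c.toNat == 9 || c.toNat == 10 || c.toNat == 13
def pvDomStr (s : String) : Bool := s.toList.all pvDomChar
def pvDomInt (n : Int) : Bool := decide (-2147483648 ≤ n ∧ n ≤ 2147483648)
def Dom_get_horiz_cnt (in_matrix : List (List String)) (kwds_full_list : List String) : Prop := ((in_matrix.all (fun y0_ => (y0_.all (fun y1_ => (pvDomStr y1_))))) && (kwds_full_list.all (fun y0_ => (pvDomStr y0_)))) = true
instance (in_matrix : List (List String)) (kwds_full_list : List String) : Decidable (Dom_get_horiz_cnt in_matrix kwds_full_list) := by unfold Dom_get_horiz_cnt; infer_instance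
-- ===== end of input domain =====

-- B concatenates each row once, records prefix character offsets of the cell boundaries, finds
-- every occurrence position of each word in the concatenated row and counts a column iff some
-- occurrence lies inside its offset interval, instead of A's join-and-substring-test per window;
-- equivalence of the returned count.

-- ===== PORT A =====
def get_horiz_cnt (in_matrix : List (List String)) (kwds_full_list : List String) : Int :=
  kwds_full_list.foldl (fun kwds_cnt word =>
    let word_len : Int := PySem.Str.len word
    (PySem.List.enumerate in_matrix).foldl (fun cnt1 rowp =>
      let row := rowp.2
      (PySem.List.enumerate row).foldl (fun cnt2 colp =>
        let col_idx := colp.1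
        let col_idx_max := col_idx + word_len
        if col_idx_max ≤ (row.length : Int) then
          let to_test := PySem.Str.join "" (PySem.List.slice row (some col_idx) (some col_idx_max))
          if PySem.Str.isIn word to_test then cnt2 + 1 else cnt2
        else cnt2) cnt1) kwds_cnt) 0

-- ===== PORT B =====
def get_horiz_cnt_alt (in_matrix : List (List String)) (kwds_full_list : List String) : Int :=
  in_matrix.foldl (fun total row =>
    let starts : List Int :=
      row.foldl (fun st cell => st ++ [PySem.List.pyGetD st (-1) 0 + PySem.Str.len cell]) [(0 : Int)]
    let full := PySem.Str.join "" row
    let width : Int := (row.length : Int)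
    kwds_full_list.foldl (fun t1 word =>
      let wl := PySem.Str.len word
      let occ := (PySem.List.pyRange 0 (PySem.Str.len full + 1) 1).filter
        (fun p => PySem.Str.slice full (some p) (some (p + wl)) == word)
      (PySem.List.pyRange 0 width 1).foldl (fun t2 col =>
        if col + wl ≤ width ∧
           (occ.any (fun p => decide (PySem.List.pyGetD starts col 0 ≤ p) &&
                              decide (p + wl ≤ PySem.List.pyGetD starts (col + wl) 0))) = true
        then t2 + 1 else t2) t1) total) 0

-- ===== PRECONDITION & SPEC =====
def Spec_get_horiz_cnt (in_matrix : List (List String)) (kwds_full_list : List String) (out : Int) : Prop := out = get_horiz_cnt_alt in_matrix kwds_full_list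
instance (in_matrix : List (List String)) (kwds_full_list : List String) (out : Int) : Decidable (Spec_get_horiz_cnt in_matrix kwds_full_list out) := by unfold Spec_get_horiz_cnt; infer_instance

-- ===== CLAIM (what is proved, stated in full; the proofs are below) =====
def Claim_equal_get_horiz_cnt : Prop := ∀ (in_matrix : List (List String)) (kwds_full_list : List String), Dom_get_horiz_cnt in_matrix kwds_full_list → Spec_get_horiz_cnt in_matrix kwds_full_list (get_horiz_cnt in_matrix kwds_full_list)

-- ===== LEMMAS AND PROOFS =====

-- the concatenated row, its prefix-offset sums, A's and B's per-position 0/1 indicators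
def pvF (row : List String) : List Char := (row.map String.toList).flatten

def pvS (row : List String) (i : Nat) : Nat := ((row.map (fun s => s.toList.length)).take i).sum

def pvStarts (row : List String) : List Int :=
  row.foldl (fun st cell => st ++ [PySem.List.pyGetD st (-1) 0 + PySem.Str.len cell]) [(0 : Int)]

def pvOcc (row : List String) (w : String) : List Int :=
  (PySem.List.pyRange 0 (PySem.Str.len (PySem.Str.join "" row) + 1) 1).filter
    (fun p => PySem.Str.slice (PySem.Str.join "" row) (some p) (some (p + PySem.Str.len w)) == w)

def pvInd (row : List String) (col : Int) (w : String) : Int :=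
  if col + PySem.Str.len w ≤ (row.length : Int) ∧
     PySem.Str.isIn w (PySem.Str.join "" (PySem.List.slice row (some col) (some (col + PySem.Str.len w))))
  then 1 else 0

def pvIndB (row : List String) (col : Int) (w : String) : Int :=
  if col + PySem.Str.len w ≤ (row.length : Int) ∧
     ((pvOcc row w).any (fun p => decide (PySem.List.pyGetD (pvStarts row) col 0 ≤ p) &&
                                  decide (p + PySem.Str.len w ≤ PySem.List.pyGetD (pvStarts row) (col + PySem.Str.len w) 0))) = true
  then 1 else 0

-- fold over pairs that uses only one component is a fold over the mapped list
lemma pvFoldl_fst {γ : Type} (l : List (Int × γ)) (g : Int → Int → Int) (i : Int) :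
    l.foldl (fun a p => g a p.1) i = (l.map (fun p => p.1)).foldl g i :=
  (List.foldl_map (f := fun p : Int × γ => p.1) (g := g) (l := l) (init := i)).symm

lemma pvFoldl_snd {γ : Type} (l : List (Int × γ)) (g : Int → γ → Int) (i : Int) :
    l.foldl (fun a p => g a p.2) i = (l.map (fun p => p.2)).foldl g i :=
  (List.foldl_map (f := fun p : Int × γ => p.2) (g := g) (l := l) (init := i)).symm

-- fold with a state-independent additive step is init + sum
lemma pvFoldl_sum {α : Type} (l : List α) (f : Int → α → Int) (g : α → Int) (i : Int)
    (h : ∀ a x, f a x = a + g x) : l.foldl f i = i + (l.map g).sum := by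
  have hf : f = fun a x => a + g x := funext fun a => funext fun x => h a x
  rw [hf]
  exact PySem.List.foldl_add l g i

-- A as a triple sum (word outermost)
lemma A_as_sum (m : List (List String)) (kwds : List String) :
    get_horiz_cnt m kwds =
      (kwds.map (fun w =>
        (m.map (fun row =>
          ((PySem.List.pyRange 0 (row.length : Int) 1).map (fun col => pvInd row col w)).sum)).sum)).sum := by
  have hinner : ∀ (row : List String) (w : String) (a : Int),
      (PySem.List.enumerate row).foldl (fun cnt2 colp =>
        if colp.1 + PySem.Str.len w ≤ (row.length : Int) then
          if PySem.Str.isIn w (PySem.Str.join "" (PySem.List.slice row (some colp.1) (some (colp.1 + PySem.Str.len w)))) then cnt2 + 1 else cnt2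
        else cnt2) a
      = a + ((PySem.List.pyRange 0 (row.length : Int) 1).map (fun col => pvInd row col w)).sum := by
    intro row w a
    have hpt : ∀ (a col : Int),
        (if col + PySem.Str.len w ≤ (row.length : Int) then
          if PySem.Str.isIn w (PySem.Str.join "" (PySem.List.slice row (some col) (some (col + PySem.Str.len w)))) then a + 1 else a
        else a) = a + pvInd row col w := by
      intro a col
      unfold pvInd
      split_ifs <;> first | omega | tauto
    calc (PySem.List.enumerate row).foldl (fun cnt2 colp =>
          if colp.1 + PySem.Str.len w ≤ (row.length : Int) then
            if PySem.Str.isIn w (PySem.Str.join "" (PySem.List.slice row (some colp.1) (some (colp.1 + PySem.Str.len w)))) then cnt2 + 1 else cnt2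
          else cnt2) a
        = ((PySem.List.enumerate row).map (fun p => p.1)).foldl (fun cnt2 col =>
            if col + PySem.Str.len w ≤ (row.length : Int) then
              if PySem.Str.isIn w (PySem.Str.join "" (PySem.List.slice row (some col) (some (col + PySem.Str.len w)))) then cnt2 + 1 else cnt2
            else cnt2) a :=
          pvFoldl_fst (PySem.List.enumerate row) (fun cnt2 col =>
            if col + PySem.Str.len w ≤ (row.length : Int) then
              if PySem.Str.isIn w (PySem.Str.join "" (PySem.List.slice row (some col) (some (col + PySem.Str.len w)))) then cnt2 + 1 else cnt2
            else cnt2) a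
      _ = (PySem.List.pyRange 0 (0 + (row.length : Int)) 1).foldl (fun cnt2 col =>
            if col + PySem.Str.len w ≤ (row.length : Int) then
              if PySem.Str.isIn w (PySem.Str.join "" (PySem.List.slice row (some col) (some (col + PySem.Str.len w)))) then cnt2 + 1 else cnt2
            else cnt2) a := by rw [PySem.List.map_fst_enumerate]
      _ = (PySem.List.pyRange 0 ((row.length : Int)) 1).foldl (fun cnt2 col =>
            if col + PySem.Str.len w ≤ (row.length : Int) then
              if PySem.Str.isIn w (PySem.Str.join "" (PySem.List.slice row (some col) (some (col + PySem.Str.len w)))) then cnt2 + 1 else cnt2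
            else cnt2) a := by rw [zero_add]
      _ = a + ((PySem.List.pyRange 0 (row.length : Int) 1).map (fun col => pvInd row col w)).sum :=
          pvFoldl_sum _ _ _ _ hpt
  have hmid : ∀ (w : String) (a : Int),
      (PySem.List.enumerate m).foldl (fun cnt1 rowp =>
        (PySem.List.enumerate rowp.2).foldl (fun cnt2 colp =>
          if colp.1 + PySem.Str.len w ≤ (rowp.2.length : Int) then
            if PySem.Str.isIn w (PySem.Str.join "" (PySem.List.slice rowp.2 (some colp.1) (some (colp.1 + PySem.Str.len w)))) then cnt2 + 1 else cnt2
          else cnt2) cnt1) a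
      = a + (m.map (fun row =>
          ((PySem.List.pyRange 0 (row.length : Int) 1).map (fun col => pvInd row col w)).sum)).sum := by
    intro w a
    calc (PySem.List.enumerate m).foldl (fun cnt1 rowp =>
          (PySem.List.enumerate rowp.2).foldl (fun cnt2 colp =>
            if colp.1 + PySem.Str.len w ≤ (rowp.2.length : Int) then
              if PySem.Str.isIn w (PySem.Str.join "" (PySem.List.slice rowp.2 (some colp.1) (some (colp.1 + PySem.Str.len w)))) then cnt2 + 1 else cnt2
            else cnt2) cnt1) a
        = ((PySem.List.enumerate m).map (fun p => p.2)).foldl (fun cnt1 row =>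
            (PySem.List.enumerate row).foldl (fun cnt2 colp =>
              if colp.1 + PySem.Str.len w ≤ (row.length : Int) then
                if PySem.Str.isIn w (PySem.Str.join "" (PySem.List.slice row (some colp.1) (some (colp.1 + PySem.Str.len w)))) then cnt2 + 1 else cnt2
              else cnt2) cnt1) a :=
          pvFoldl_snd (PySem.List.enumerate m) (fun cnt1 row =>
            (PySem.List.enumerate row).foldl (fun cnt2 colp =>
              if colp.1 + PySem.Str.len w ≤ (row.length : Int) then
                if PySem.Str.isIn w (PySem.Str.join "" (PySem.List.slice row (some colp.1) (some (colp.1 + PySem.Str.len w)))) then cnt2 + 1 else cnt2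
              else cnt2) cnt1) a
      _ = m.foldl (fun cnt1 row =>
            (PySem.List.enumerate row).foldl (fun cnt2 colp =>
              if colp.1 + PySem.Str.len w ≤ (row.length : Int) then
                if PySem.Str.isIn w (PySem.Str.join "" (PySem.List.slice row (some colp.1) (some (colp.1 + PySem.Str.len w)))) then cnt2 + 1 else cnt2
              else cnt2) cnt1) a := by rw [PySem.List.map_snd_enumerate]
      _ = a + (m.map (fun row =>
            ((PySem.List.pyRange 0 (row.length : Int) 1).map (fun col => pvInd row col w)).sum)).sum :=
          pvFoldl_sum _ _ _ _ (fun a row => hinner row w a)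
  have := pvFoldl_sum kwds
      (fun kwds_cnt word =>
        (PySem.List.enumerate m).foldl (fun cnt1 rowp =>
          (PySem.List.enumerate rowp.2).foldl (fun cnt2 colp =>
            if colp.1 + PySem.Str.len word ≤ (rowp.2.length : Int) then
              if PySem.Str.isIn word (PySem.Str.join "" (PySem.List.slice rowp.2 (some colp.1) (some (colp.1 + PySem.Str.len word)))) then cnt2 + 1 else cnt2
            else cnt2) cnt1) kwds_cnt)
      (fun w => (m.map (fun row =>
        ((PySem.List.pyRange 0 (row.length : Int) 1).map (fun col => pvInd row col w)).sum)).sum)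
      0 (fun a w => hmid w a)
  exact (this.trans (zero_add _))

-- B as a triple sum (row outermost)
lemma B_as_sum (m : List (List String)) (kwds : List String) :
    get_horiz_cnt_alt m kwds =
      (m.map (fun row =>
        (kwds.map (fun w =>
          ((PySem.List.pyRange 0 (row.length : Int) 1).map (fun col => pvIndB row col w)).sum)).sum)).sum := by
  have hcol : ∀ (row : List String) (w : String) (a : Int),
      (PySem.List.pyRange 0 (row.length : Int) 1).foldl (fun t2 col =>
        if col + PySem.Str.len w ≤ (row.length : Int) ∧
           ((pvOcc row w).any (fun p => decide (PySem.List.pyGetD (pvStarts row) col 0 ≤ p) &&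
                                        decide (p + PySem.Str.len w ≤ PySem.List.pyGetD (pvStarts row) (col + PySem.Str.len w) 0))) = true
        then t2 + 1 else t2) a
      = a + ((PySem.List.pyRange 0 (row.length : Int) 1).map (fun col => pvIndB row col w)).sum := by
    intro row w a
    apply pvFoldl_sum
    intro a col
    unfold pvIndB
    split_ifs <;> omega
  have hw : ∀ (row : List String) (a : Int),
      kwds.foldl (fun t1 word =>
        (PySem.List.pyRange 0 (row.length : Int) 1).foldl (fun t2 col =>
          if col + PySem.Str.len word ≤ (row.length : Int) ∧
             ((pvOcc row word).any (fun p => decide (PySem.List.pyGetD (pvStarts row) col 0 ≤ p) &&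
                                             decide (p + PySem.Str.len word ≤ PySem.List.pyGetD (pvStarts row) (col + PySem.Str.len word) 0))) = true
          then t2 + 1 else t2) t1) a
      = a + (kwds.map (fun w =>
          ((PySem.List.pyRange 0 (row.length : Int) 1).map (fun col => pvIndB row col w)).sum)).sum := by
    intro row a
    exact pvFoldl_sum _ _ _ _ (fun a w => hcol row w a)
  have houter := pvFoldl_sum m
      (fun total row =>
        kwds.foldl (fun t1 word =>
          (PySem.List.pyRange 0 (row.length : Int) 1).foldl (fun t2 col =>
            if col + PySem.Str.len word ≤ (row.length : Int) ∧
               ((pvOcc row word).any (fun p => decide (PySem.List.pyGetD (pvStarts row) col 0 ≤ p) &&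
                                               decide (p + PySem.Str.len word ≤ PySem.List.pyGetD (pvStarts row) (col + PySem.Str.len word) 0))) = true
            then t2 + 1 else t2) t1) total)
      (fun row => (kwds.map (fun w =>
          ((PySem.List.pyRange 0 (row.length : Int) 1).map (fun col => pvIndB row col w)).sum)).sum)
      0 (fun a row => hw row a)
  calc get_horiz_cnt_alt m kwds
      = m.foldl (fun total row =>
          kwds.foldl (fun t1 word =>
            (PySem.List.pyRange 0 (row.length : Int) 1).foldl (fun t2 col =>
              if col + PySem.Str.len word ≤ (row.length : Int) ∧
                 ((pvOcc row word).any (fun p => decide (PySem.List.pyGetD (pvStarts row) col 0 ≤ p) &&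
                                                 decide (p + PySem.Str.len word ≤ PySem.List.pyGetD (pvStarts row) (col + PySem.Str.len word) 0))) = true
              then t2 + 1 else t2) t1) total) 0 := by
        simp only [get_horiz_cnt_alt, pvOcc, pvStarts]
        rfl
    _ = _ := houter.trans (zero_add _)

-- interchange of two list sums
lemma sum_comm_list {α β : Type} (l1 : List α) (l2 : List β) (f : α → β → Int) :
    (l1.map (fun a => (l2.map (fun b => f a b)).sum)).sum
      = (l2.map (fun b => (l1.map (fun a => f a b)).sum)).sum := by
  induction l1 with
  | nil => simp
  | cons a t ih =>
    simp only [List.map_cons, List.sum_cons, ih]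
    rw [← PySem.List.sum_map_add_int]

-- Chars.join with the empty separator is flatten
lemma pvJoin_nil_flatten (l : List (List Char)) : PySem.Chars.join [] l = l.flatten := by
  induction l with
  | nil => simp [PySem.Chars.join_nil]
  | cons a t ih =>
    cases t with
    | nil => simp [PySem.Chars.join_singleton]
    | cons b u =>
      rw [PySem.Chars.join_cons_cons, ih]
      simp

lemma pvToList_join (row : List String) :
    (PySem.Str.join "" row).toList = pvF row := by
  rw [PySem.Str.toList_join]
  show PySem.Chars.join [] (row.map String.toList) = pvF row
  rw [pvJoin_nil_flatten]; rfl

-- take of given length equals w iff w is a prefix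
lemma pvTake_eq_iff_prefix (xs w : List Char) : xs.take w.length = w ↔ w <+: xs := by
  constructor
  · intro h; rw [← h]; exact List.take_prefix _ _
  · intro h; rw [List.prefix_iff_eq_take] at h; exact h.symm

-- flatten cut at chunk-boundary offsets
lemma pvFlatten_drop_sum {α : Type} (l : List (List α)) (c : Nat) :
    l.flatten.drop (((l.map List.length).take c).sum) = (l.drop c).flatten := by
  induction l generalizing c with
  | nil => simp
  | cons a t ih =>
    cases c with
    | zero => simp
    | succ c =>
      simp only [List.map_cons, List.take_succ_cons, List.sum_cons, List.flatten_cons,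
        List.drop_succ_cons]
      rw [List.drop_append, List.drop_eq_nil_of_le (by omega), List.nil_append,
        Nat.add_sub_cancel_left, ih]

lemma pvFlatten_take_sum {α : Type} (l : List (List α)) (c : Nat) :
    l.flatten.take (((l.map List.length).take c).sum) = (l.take c).flatten := by
  induction l generalizing c with
  | nil => simp
  | cons a t ih =>
    cases c with
    | zero => simp
    | succ c =>
      simp only [List.map_cons, List.take_succ_cons, List.sum_cons, List.flatten_cons]
      rw [List.take_append, List.take_of_length_le (by omega), Nat.add_sub_cancel_left, ih]

lemma pvS_add (row : List String) (c L : Nat) :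
    pvS row (c + L) = pvS row c + (((row.map (fun s => s.toList.length)).drop c).take L).sum := by
  unfold pvS
  rw [List.take_add, List.sum_append]

lemma pvS_le (row : List String) (c L : Nat) : pvS row c ≤ pvS row (c + L) := by
  rw [pvS_add]; omega

-- map of lengths through toList
lemma pvMapLen (l : List String) :
    (l.map String.toList).map List.length = l.map (fun s => s.toList.length) := by
  simp only [List.map_map]; exact rfl

lemma pvS_le_lenF (row : List String) (i : Nat) : pvS row i ≤ (pvF row).length := by
  unfold pvS pvF
  rw [List.length_flatten, pvMapLen]
  conv_rhs => rw [← List.take_append_drop i (row.map (fun s => s.toList.length))]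
  rw [List.sum_append]
  omega

-- the joined window is a slice of the concatenated row at the prefix offsets
lemma pvSeg_eq (row : List String) (c L : Nat) :
    pvF ((row.drop c).take L)
      = ((pvF row).drop (pvS row c)).take (pvS row (c + L) - pvS row c) := by
  show (((row.drop c).take L).map String.toList).flatten = _
  rw [List.map_take, List.map_drop]
  have hsum : ((((row.map String.toList).drop c).map List.length).take L).sum
      = pvS row (c + L) - pvS row c := by
    have h5 : ((row.map String.toList).drop c).map List.length
        = (row.map (fun s => s.toList.length)).drop c := by
      rw [List.map_drop, pvMapLen]
    rw [h5]
    have h6 := pvS_add row c L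
    omega
  have h1 : (pvF row).drop (pvS row c) = ((row.map String.toList).drop c).flatten := by
    show (row.map String.toList).flatten.drop (pvS row c) = _
    unfold pvS
    rw [← pvMapLen]
    exact pvFlatten_drop_sum (row.map String.toList) c
  rw [h1, ← hsum]
  exact (pvFlatten_take_sum ((row.map String.toList).drop c) L).symm

-- infix of a middle slice iff a prefix occurrence inside the offsets
lemma pvInfix_seg_iff {α : Type} (F w : List α) (a b : Nat) (hab : a ≤ b) (hb : b ≤ F.length) :
    w <:+: (F.drop a).take (b - a) ↔ ∃ p : Nat, a ≤ p ∧ p + w.length ≤ b ∧ w <+: F.drop p := by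
  constructor
  · intro h
    obtain ⟨u, v, huv⟩ := h
    refine ⟨a + u.length, by omega, ?_, ?_⟩
    · have hlen : ((F.drop a).take (b - a)).length = b - a := by
        rw [List.length_take, List.length_drop]; omega
      have : u.length + w.length + v.length = b - a := by
        rw [← hlen, ← huv]; simp [List.length_append]; omega
      omega
    · have hdrop : ((F.drop a).take (b - a)).drop u.length = w ++ v := by
        rw [← huv, List.append_assoc, List.drop_append]
        simp
      rw [List.drop_take, List.drop_drop] at hdrop
      have hpre : w <+: (F.drop (a + u.length)).take (b - a - u.length) := ⟨v, hdrop.symm⟩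
      exact (List.prefix_take_iff.mp hpre).1
  · rintro ⟨p, h1, h2, h3⟩
    have hpre : w <+: (F.drop p).take (b - p) :=
      List.prefix_take_iff.mpr ⟨h3, by omega⟩
    have heq : (F.drop p).take (b - p) = ((F.drop a).take (b - a)).drop (p - a) := by
      rw [List.drop_take, List.drop_drop]
      congr 1
      · omega
      · congr 1; omega
    rw [heq] at hpre
    exact hpre.isInfix.trans (List.drop_suffix _ _).isInfix

-- the built offset list is the prefix-sum table
lemma pvStarts_aux (row : List String) (pre : List Int) (b : Int) :
    row.foldl (fun st cell => st ++ [PySem.List.pyGetD st (-1) 0 + PySem.Str.len cell]) (pre ++ [b])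
      = pre ++ (List.range (row.length + 1)).map (fun i => b + (pvS row i : Int)) := by
  induction row generalizing pre b with
  | nil =>
    simp [pvS]
  | cons cell t ih =>
    simp only [List.foldl_cons, PySem.List.pyGetD_neg_one_append_singleton]
    rw [ih (pre ++ [b]) (b + PySem.Str.len cell), List.append_assoc]
    congr 1
    rw [show (cell :: t).length + 1 = t.length + 1 + 1 from by simp]
    conv_rhs => rw [List.range_succ_eq_map]
    rw [List.map_cons, List.map_map, List.singleton_append]
    congr 1
    · simp [pvS]
    · apply List.map_congr_left
      intro i _
      simp only [Function.comp_apply, Nat.succ_eq_add_one, pvS, List.map_cons,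
        List.take_succ_cons, List.sum_cons, PySem.Str.len_eq]
      push_cast
      ring

lemma pvStarts_eq (row : List String) :
    pvStarts row = (List.range (row.length + 1)).map (fun i => (pvS row i : Int)) := by
  unfold pvStarts
  have := pvStarts_aux row [] 0
  simp only [List.nil_append] at this
  rw [this]
  apply List.map_congr_left
  intro i _
  omega

lemma pvStarts_get (row : List String) (c : Nat) (h : c ≤ row.length) :
    PySem.List.pyGetD (pvStarts row) (c : Int) 0 = (pvS row c : Int) := by
  rw [pvStarts_eq, PySem.List.pyGetD_natCast]
  exact PySem.List.getD_map_range _ _ _ _ (by omega)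

-- pointwise: B's occurrence-interval test equals A's window substring test
set_option maxHeartbeats 1000000 in
lemma pvInd_eq (row : List String) (w : String) (col : Int)
    (hmem : col ∈ PySem.List.pyRange 0 (row.length : Int) 1) :
    pvIndB row col w = pvInd row col w := by
  have hcol := PySem.List.mem_pyRange_one.mp hmem
  obtain ⟨h0, hlt⟩ := hcol
  set c : Nat := col.toNat with hcdef
  have hc : col = (c : Int) := (Int.toNat_of_nonneg h0).symm
  set Lw : Nat := w.toList.length with hLdef
  have hwl : PySem.Str.len w = (Lw : Int) := PySem.Str.len_eq w
  unfold pvIndB pvInd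
  apply if_congr _ rfl rfl
  apply and_congr_right
  intro hguard
  have hcl : c + Lw ≤ row.length := by
    rw [hc, hwl] at hguard
    exact_mod_cast hguard
  -- left side: substring test on the joined window
  have hjoined : (PySem.Str.join "" (PySem.List.slice row (some col) (some (col + PySem.Str.len w)))).toList
      = ((pvF row).drop (pvS row c)).take (pvS row (c + Lw) - pvS row c) := by
    rw [hc, hwl, pvToList_join, PySem.List.slice_natCast_add]
    exact pvSeg_eq row c Lw
  have hlhs : (PySem.Str.isIn w (PySem.Str.join "" (PySem.List.slice row (some col) (some (col + PySem.Str.len w)))) = true)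
      ↔ ∃ p : Nat, pvS row c ≤ p ∧ p + Lw ≤ pvS row (c + Lw) ∧ w.toList <+: (pvF row).drop p := by
    rw [PySem.Str.isIn_iff_infix, hjoined]
    rw [pvInfix_seg_iff (pvF row) w.toList (pvS row c) (pvS row (c + Lw))
      (pvS_le row c Lw) (pvS_le_lenF row (c + Lw))]
  rw [hlhs]
  -- right side: some occurrence position lies inside the column's offset interval
  have hF : PySem.Str.len (PySem.Str.join "" row) = ((pvF row).length : Int) := by
    rw [PySem.Str.len_eq, pvToList_join]
  have hgc : PySem.List.pyGetD (pvStarts row) col 0 = (pvS row c : Int) := by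
    rw [hc]; exact pvStarts_get row c (by omega)
  have hgcl : PySem.List.pyGetD (pvStarts row) (col + PySem.Str.len w) 0 = (pvS row (c + Lw) : Int) := by
    rw [hc, hwl, show ((c : Int) + (Lw : Int)) = ((c + Lw : Nat) : Int) by push_cast; ring]
    exact pvStarts_get row (c + Lw) hcl
  rw [List.any_eq_true]
  constructor
  · rintro ⟨p, hpmem, hf⟩
    unfold pvOcc at hpmem
    rw [List.mem_filter] at hpmem
    obtain ⟨hpr, hpred⟩ := hpmem
    rw [PySem.List.mem_pyRange_one] at hpr
    simp only [Bool.and_eq_true, decide_eq_true_eq] at hf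
    rw [hgc, hgcl, hwl] at hf
    obtain ⟨hf1, hf2⟩ := hf
    have hp0 : 0 ≤ p := hpr.1
    set pn : Nat := p.toNat with hpndef
    have hpn : p = (pn : Int) := (Int.toNat_of_nonneg hp0).symm
    refine ⟨pn, ?_, ?_, ?_⟩
    · rw [hpn] at hf1; exact_mod_cast hf1
    · rw [hpn] at hf2
      have : (pn : Int) + (Lw : Int) ≤ (pvS row (c + Lw) : Int) := hf2
      exact_mod_cast this
    · simp only [beq_iff_eq] at hpred
      have := congrArg String.toList hpred
      rw [PySem.Str.toList_slice, PySem.Chars.slice_eq_listSlice, pvToList_join, hwl, hpn,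
        PySem.List.slice_natCast_add] at this
      exact (pvTake_eq_iff_prefix _ _).mp this
  · rintro ⟨p, h1, h2, h3⟩
    refine ⟨(p : Int), ?_, ?_⟩
    · unfold pvOcc
      rw [List.mem_filter]
      constructor
      · rw [PySem.List.mem_pyRange_one, hF]
        have hle := pvS_le_lenF row (c + Lw)
        constructor
        · exact_mod_cast Nat.zero_le p
        · have : p ≤ (pvF row).length := by omega
          exact_mod_cast Nat.lt_succ_of_le this
      · simp only [beq_iff_eq]
        apply String.toList_inj.mp
        rw [PySem.Str.toList_slice, PySem.Chars.slice_eq_listSlice, pvToList_join, hwl,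
          PySem.List.slice_natCast_add]
        exact (pvTake_eq_iff_prefix _ _).mpr h3
    · simp only [Bool.and_eq_true, decide_eq_true_eq]
      rw [hgc, hgcl, hwl]
      constructor
      · exact_mod_cast h1
      · exact_mod_cast h2

-- ===== VERDICT (by name: the statement is the Claim_ definition above) =====
set_option maxHeartbeats 1000000 in
theorem get_horiz_cnt_spec : Claim_equal_get_horiz_cnt := by
  intro m kwds _
  show get_horiz_cnt m kwds = get_horiz_cnt_alt m kwds
  rw [A_as_sum, B_as_sum]
  have hpt : ∀ (row : List String) (w : String),
      ((PySem.List.pyRange 0 (row.length : Int) 1).map (fun col => pvIndB row col w)).sum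
        = ((PySem.List.pyRange 0 (row.length : Int) 1).map (fun col => pvInd row col w)).sum := by
    intro row w
    exact congrArg List.sum (List.map_congr_left (fun col hcol => pvInd_eq row w col hcol))
  calc (kwds.map (fun w => (m.map (fun row =>
          ((PySem.List.pyRange 0 (row.length : Int) 1).map (fun col => pvInd row col w)).sum)).sum)).sum
      = (m.map (fun row => (kwds.map (fun w =>
          ((PySem.List.pyRange 0 (row.length : Int) 1).map (fun col => pvInd row col w)).sum)).sum)).sum := by
        exact sum_comm_list kwds m (fun w row =>
          ((PySem.List.pyRange 0 (row.length : Int) 1).map (fun col => pvInd row col w)).sum)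
    _ = (m.map (fun row => (kwds.map (fun w =>
          ((PySem.List.pyRange 0 (row.length : Int) 1).map (fun col => pvIndB row col w)).sum)).sum)).sum := by
        exact congrArg List.sum (List.map_congr_left (fun row _ =>
          congrArg List.sum (List.map_congr_left (fun w _ => (hpt row w).symm))))
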